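-- pv_equiv track=rewrite | github.com/paiml/depyler | examples/hard_edge_flag_patterns.py | validate_brackets
-- ===== SOURCE A (Python) =====
-- def validate_brackets(depths: list[int]) -> int:
--     """Simulate bracket validation using depth tracking.
--     Each element is +1 (open) or -1 (close).
--     Return 1 if valid (depth never negative, ends at 0)."""
--     depth: int = 0
--     went_negative: int = 0
--     i: int = 0
--     while i < len(depths):
--         depth = depth + depths[i]
--         if depth < 0:
--             went_negative = 1
--         i = i + 1
--     if went_negative == 1:
--         return 0
--     if depth != 0:
--         return 0
--     return 1
-- ===== SOURCE B (Python) =====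
-- def validate_brackets(depths: list[int]) -> int:
--     """Materialize the prefix-sum table, then decide validity with two
--     aggregate checks (no running flag / incremental state tests)."""
--     prefixes: list[int] = []
--     for d in depths:
--         prefixes.append((prefixes[-1] if prefixes else 0) + d)
--     ok = min(prefixes, default=0) >= 0 and (not prefixes or prefixes[-1] == 0)
--     return 1 if ok else 0
-- ===== Notes on version B (the rewrite author's own statement) =====
-- stated objective: alternative
-- what changed: Replaces A's running-depth loop with a mutable went_negative flag by a materialized prefix-sum table judged afterwards with two aggregate checks (min of the table and its last entry).
import Mathlib
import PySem

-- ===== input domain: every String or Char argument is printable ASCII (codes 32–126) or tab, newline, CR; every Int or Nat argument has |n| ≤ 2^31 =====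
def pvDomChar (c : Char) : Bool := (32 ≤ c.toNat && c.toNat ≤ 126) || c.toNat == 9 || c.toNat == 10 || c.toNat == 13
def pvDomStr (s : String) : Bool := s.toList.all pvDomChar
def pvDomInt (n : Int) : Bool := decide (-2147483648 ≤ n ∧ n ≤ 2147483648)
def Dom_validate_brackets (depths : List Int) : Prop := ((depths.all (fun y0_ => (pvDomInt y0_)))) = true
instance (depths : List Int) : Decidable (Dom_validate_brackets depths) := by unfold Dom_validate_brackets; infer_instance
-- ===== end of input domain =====

-- B keeps A's return value everywhere; it differs only in decomposition (prefix table + aggregate checks).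

-- ===== PORT A =====
-- A's while loop over indices is the fold over the list elements with state (depth, went_negative).
def validate_brackets (depths : List Int) : Int :=
  let st := depths.foldl
    (fun (s : Int × Int) d =>
      let depth := s.1 + d
      (depth, if depth < 0 then 1 else s.2))
    (0, 0)
  if st.2 == 1 then 0
  else if st.1 ≠ 0 then 0
  else 1

-- ===== PORT B =====
-- the append loop building the prefix table; '(prefixes[-1] if prefixes else 0)' is getLastD 0,
-- 'min(prefixes, default=0)' is (PySem.List.min? _ id).getD 0 (exact: first minimal element, default on [])
def validate_brackets_alt (depths : List Int) : Int :=
  let prefixes := depths.foldl (fun (ps : List Int) d => ps ++ [ps.getLastD 0 + d]) []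
  let ok := ((PySem.List.min? prefixes (fun x => x)).getD 0 ≥ 0)
            ∧ (prefixes = [] ∨ prefixes.getLastD 0 = 0)
  if ok then 1 else 0

-- ===== PRECONDITION & SPEC =====
def Spec_validate_brackets (depths : List Int) (out : Int) : Prop := out = validate_brackets_alt depths
instance (depths : List Int) (out : Int) : Decidable (Spec_validate_brackets depths out) := by unfold Spec_validate_brackets; infer_instance

-- ===== CLAIM (what is proved, stated in full; the proofs are below) =====
def Claim_equal_validate_brackets : Prop := ∀ (depths : List Int), Dom_validate_brackets depths → Spec_validate_brackets depths (validate_brackets depths)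

-- ===== LEMMAS AND PROOFS =====

/-- the list of prefix sums of `l` starting from running total `s` -/
def pvScan (s : Int) : List Int → List Int
  | [] => []
  | d :: t => (s + d) :: pvScan (s + d) t

theorem pvScan_ne_nil (s : Int) (d : Int) (t : List Int) : pvScan s (d :: t) ≠ [] := by
  simp [pvScan]

theorem foldB_eq (l : List Int) : ∀ ps : List Int,
    l.foldl (fun (ps : List Int) d => ps ++ [ps.getLastD 0 + d]) ps
      = ps ++ pvScan (ps.getLastD 0) l := by
  induction l with
  | nil => intro ps; simp [pvScan]
  | cons d t ih =>
    intro ps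
    simp only [List.foldl_cons, pvScan]
    rw [ih]
    simp

theorem pvScan_last (l : List Int) : ∀ (s x : Int), l ≠ [] →
    (pvScan s l).getLastD x = s + l.sum := by
  induction l with
  | nil => intro s x h; simp at h
  | cons d t ih =>
    intro s x _
    cases t with
    | nil => simp [pvScan]
    | cons e u =>
      show ((s + d) :: pvScan (s + d) (e :: u)).getLastD x = _
      rw [List.getLastD_cons, ih (s + d) (s + d) (by simp)]
      simp
      ring

/-- A's went_negative condition, as a recursion over the list -/
def pvNeg (s : Int) : List Int → Bool
  | [] => false
  | d :: t => (decide (s + d < 0)) || pvNeg (s + d) t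

theorem foldA_eq (l : List Int) : ∀ (s f : Int),
    l.foldl (fun (st : Int × Int) d =>
        let depth := st.1 + d
        (depth, if depth < 0 then 1 else st.2)) (s, f)
      = (s + l.sum, if pvNeg s l then 1 else f) := by
  induction l with
  | nil => intro s f; simp [pvNeg]
  | cons d t ih =>
    intro s f
    simp only [List.foldl_cons, pvNeg]
    rw [ih]
    by_cases h : s + d < 0 <;> simp [h, List.sum_cons] <;> ring

theorem pvNeg_iff (l : List Int) : ∀ s : Int,
    pvNeg s l = true ↔ ∃ p ∈ pvScan s l, p < 0 := by
  induction l with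
  | nil => intro s; simp [pvNeg, pvScan]
  | cons d t ih =>
    intro s
    simp [pvNeg, pvScan, ih (s + d)]

theorem min_getD_nonneg (ps : List Int) :
    ((PySem.List.min? ps (fun x => x)).getD 0 ≥ 0) ↔ ∀ p ∈ ps, 0 ≤ p := by
  cases hm : PySem.List.min? ps (fun x => x) with
  | none =>
    have : ps = [] := (PySem.List.min?_eq_none_iff _ _).1 hm
    subst this; simp
  | some m =>
    have hmem : m ∈ ps := PySem.List.min?_mem hm
    have hmin : ∀ y ∈ ps, m ≤ y := by
      intro y hy; exact PySem.List.min?_isMin hm y hy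
    simp only [Option.getD_some]
    constructor
    · intro h p hp; exact le_trans h (hmin p hp)
    · intro h; exact h m hmem

theorem validate_brackets_spec : Claim_equal_validate_brackets := by
  intro depths _
  show validate_brackets depths = validate_brackets_alt depths
  unfold validate_brackets validate_brackets_alt
  simp only [foldA_eq, foldB_eq, List.nil_append, List.getLastD_nil, zero_add]
  cases depths with
  | nil => decide
  | cons d t =>
    have hne : pvScan 0 (d :: t) ≠ [] := pvScan_ne_nil 0 d t
    have hlast : (pvScan 0 (d :: t)).getLastD 0 = 0 + (d :: t).sum :=
      pvScan_last (d :: t) 0 0 (by simp)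
    by_cases hneg : pvNeg 0 (d :: t) = true
    · obtain ⟨p, hp, hplt⟩ := (pvNeg_iff (d :: t) 0).1 hneg
      rw [if_pos (by simp [hneg]), if_neg]
      rintro ⟨h1, -⟩
      exact absurd ((min_getD_nonneg _).1 h1 p hp) (by omega)
    · simp only [Bool.not_eq_true] at hneg
      have hall : ∀ q ∈ pvScan 0 (d :: t), 0 ≤ q := by
        intro q hq
        by_contra hlt
        rw [(pvNeg_iff (d :: t) 0).2 ⟨q, hq, by omega⟩] at hneg
        simp at hneg
      rw [if_neg (by simp [hneg])]
      by_cases hs : (d :: t).sum = 0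
      · rw [if_neg (by omega), if_pos ⟨(min_getD_nonneg _).2 hall, Or.inr (by omega)⟩]
      · rw [if_pos (by omega), if_neg]
        rintro ⟨-, h2 | h2⟩
        · exact hne h2
        · omega
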